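-- pv_equiv track=rewrite | github.com/JustAzul/TraeSync | cloudflare_client.py | find_zone_for_domain
-- ===== SOURCE A (Python) =====
-- def find_zone_for_domain(domain, zones):
--     """
--     Find the appropriate Cloudflare zone for a given domain.
--     It selects the zone whose name is a suffix of the domain,
--     preferring the longest match.
--     """
--     matching_zone = None
--     for zone in zones:
--         zone_name = zone["name"]
--         if domain.endswith(zone_name):
--             if matching_zone is None or len(zone_name) > len(matching_zone["name"]):
--                 matching_zone = zone
--     return matching_zone
-- ===== SOURCE B (Python) =====
-- def find_zone_for_domain(domain, zones):
--     """
--     Find the appropriate Cloudflare zone for a given domain: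
--     index the zones by name once (first zone wins for duplicate names),
--     then probe the domain's suffixes from longest to shortest.
--     """
--     index = {}
--     for zone in zones:
--         name = zone["name"]
--         if name not in index:
--             index[name] = zone
--     for i in range(len(domain) + 1):
--         zone = index.get(domain[i:])
--         if zone is not None:
--             return zone
--     return None
-- ===== Notes on version B (the rewrite author's own statement) =====
-- stated objective: alternative
-- what changed: Instead of scanning every zone and testing endswith while tracking the longest match, B builds a first-wins dict from zone name to zone in one pass and then probes the domain's suffixes longest-first against that index, returning at the first hit.
import Mathlib
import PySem

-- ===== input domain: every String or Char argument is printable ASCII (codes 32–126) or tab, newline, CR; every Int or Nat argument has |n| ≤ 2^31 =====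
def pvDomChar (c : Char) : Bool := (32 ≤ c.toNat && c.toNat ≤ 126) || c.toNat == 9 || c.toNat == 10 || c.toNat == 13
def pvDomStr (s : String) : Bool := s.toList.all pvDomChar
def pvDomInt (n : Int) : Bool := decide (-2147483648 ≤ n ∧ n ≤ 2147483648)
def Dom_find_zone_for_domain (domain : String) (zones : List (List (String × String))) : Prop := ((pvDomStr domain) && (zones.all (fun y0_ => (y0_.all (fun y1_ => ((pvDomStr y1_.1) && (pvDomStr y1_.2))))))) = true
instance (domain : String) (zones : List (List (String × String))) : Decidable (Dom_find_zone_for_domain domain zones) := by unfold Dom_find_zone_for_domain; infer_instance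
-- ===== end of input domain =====

-- B replaces A's scan-all-zones-with-endswith by a first-wins name→zone index probed with the
-- domain's suffixes longest-first (alternative decomposition, same result; not claimed faster).

-- ===== PORT A =====
-- zone["name"], total under Pre_ (every zone dict has a "name" key)
def pvName (z : List (String × String)) : String :=
  ((PySem.Dict.mk z).get? "name").getD ""

-- loop body of A
def pvStepA (domain : String) (matching_zone : Option (List (String × String)))
    (zone : List (String × String)) : Option (List (String × String)) :=
  let zone_name := pvName zone
  if PySem.Str.endswith domain zone_name then
    match matching_zone with
    | none => some zone
    | some mz => if PySem.Str.len zone_name > PySem.Str.len (pvName mz) then some zone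
                 else matching_zone
  else matching_zone

def find_zone_for_domain (domain : String) (zones : List (List (String × String))) :
    Option (List (String × String)) :=
  zones.foldl (pvStepA domain) none

-- ===== PORT B =====
-- loop body of B's index build (first zone wins for a duplicate name)
def pvStepB (idx : PySem.Dict String (List (String × String)))
    (zone : List (String × String)) : PySem.Dict String (List (String × String)) :=
  let name := pvName zone
  if idx.contains name then idx else idx.insert name zone

def find_zone_for_domain_alt (domain : String) (zones : List (List (String × String))) :
    Option (List (String × String)) :=
  let index := zones.foldl pvStepB PySem.Dict.empty
  (PySem.List.pyRange 0 (PySem.Str.len domain + 1)).findSome?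
    (fun i => index.get? (PySem.Str.slice domain (some i) none))

-- ===== PRECONDITION & SPEC =====
-- Pre_ excludes exactly the inputs where some zone dict lacks the key "name": there the
-- Python A (and B) raises KeyError.
def Pre_find_zone_for_domain (domain : String) (zones : List (List (String × String))) : Prop :=
  ∀ z ∈ zones, ((PySem.Dict.mk z).get? "name").isSome = true
instance (domain : String) (zones : List (List (String × String))) : Decidable (Pre_find_zone_for_domain domain zones) := by unfold Pre_find_zone_for_domain; infer_instance

def pvWitness_find_zone_for_domain : String × (List (List (String × String))) :=
  ("x.a.com", [[("name", "a.com"), ("id", "1")], [("name", "x.a.com"), ("id", "2")]])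

def Spec_find_zone_for_domain (domain : String) (zones : List (List (String × String))) (out : Option (List (String × String))) : Prop := out = find_zone_for_domain_alt domain zones
instance (domain : String) (zones : List (List (String × String))) (out : Option (List (String × String))) : Decidable (Spec_find_zone_for_domain domain zones out) := by unfold Spec_find_zone_for_domain; infer_instance

-- ===== CLAIM (what is proved, stated in full; the proofs are below) =====
def Claim_equal_find_zone_for_domain : Prop := ∀ (domain : String) (zones : List (List (String × String))), Dom_find_zone_for_domain domain zones → Pre_find_zone_for_domain domain zones → Spec_find_zone_for_domain domain zones (find_zone_for_domain domain zones)

-- ===== LEMMAS AND PROOFS =====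

-- the suffix of the domain taken at offset i, as a char list
theorem pv_sfx_toList (domain : String) (i : Int) (h : 0 ≤ i) :
    (PySem.Str.slice domain (some i) none).toList = domain.toList.drop i.toNat := by
  simp [PySem.Str.slice, PySem.List.slice_from _ h]

-- every probe string B forms is a suffix of the domain
theorem pv_good_sfx (domain : String) (i : Int) (h : 0 ≤ i) :
    PySem.Str.endswith domain (PySem.Str.slice domain (some i) none) = true := by
  rw [PySem.Str.endswith_eq, pv_sfx_toList domain i h]
  exact (PySem.Chars.endswith_iff _ _).mpr (List.drop_suffix _ _)

-- conversely, every suffix of the domain is the probe at the complementary offset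
theorem pv_sfx_of_suffix (domain : String) (s : String)
    (h : s.toList <:+ domain.toList) :
    PySem.Str.slice domain
      (some ((domain.toList.length : Int) - (s.toList.length : Int))) none = s := by
  have hle : s.toList.length ≤ domain.toList.length := h.length_le
  have h0 : (0:Int) ≤ (domain.toList.length : Int) - (s.toList.length : Int) := by omega
  apply String.toList_inj.mp
  rw [pv_sfx_toList _ _ h0]
  have ht : ((domain.toList.length : Int) - (s.toList.length : Int)).toNat
      = domain.toList.length - s.toList.length := by omega
  rw [ht]
  obtain ⟨t, hts⟩ := h
  rw [← hts]
  simp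

-- B's first-wins index answers a lookup with the first zone bearing that name
theorem pv_index_get (zones : List (List (String × String)))
    (d : PySem.Dict String (List (String × String))) (s : String) :
    (zones.foldl pvStepB d).get? s
      = (d.get? s).or (zones.find? (fun z => pvName z == s)) := by
  induction zones generalizing d with
  | nil => simp
  | cons z zs ih =>
    rw [List.foldl_cons, ih]
    by_cases hs : pvName z = s
    · rw [List.find?_cons_of_pos (by simp [hs])]
      by_cases hc : d.contains s = true
      · have hsome : (d.get? s).isSome := by rw [← PySem.Dict.contains_eq_isSome_get?]; exact hc
        obtain ⟨v, hv⟩ := Option.isSome_iff_exists.mp hsome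
        have hstep : pvStepB d z = d := by simp [pvStepB, hs, hc]
        rw [hstep, hv, Option.some_or, Option.some_or]
      · have hnone : d.get? s = none := by
          have hcc := PySem.Dict.contains_eq_isSome_get? d s
          rw [Bool.eq_false_iff.mpr hc] at hcc
          exact Option.not_isSome_iff_eq_none.mp (by rw [← hcc]; simp)
        have hstep : pvStepB d z = d.insert s z := by
          simp [pvStepB, hs, hc]
        rw [hstep, PySem.Dict.get?_insert_self, hnone, Option.some_or, Option.none_or]
    · have hstep : (pvStepB d z).get? s = d.get? s := by
        simp only [pvStepB]
        split
        · rfl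
        · exact PySem.Dict.get?_insert_of_ne d _ (fun he => hs he.symm)
      rw [hstep, List.find?_cons_of_neg (by simp [hs])]

-- characterisation of A's fold: none = no zone name is a suffix of the domain; some m =
-- m's name is a suffix, m is the first zone bearing its name, and that name's length is
-- maximal among the suffix-matching zone names
theorem pv_A_char (domain : String) (zones : List (List (String × String))) :
    (List.foldl (pvStepA domain) none zones = none →
      ∀ z ∈ zones, PySem.Str.endswith domain (pvName z) = false)
    ∧ (∀ m, List.foldl (pvStepA domain) none zones = some m →
        PySem.Str.endswith domain (pvName m) = true
        ∧ zones.find? (fun z => pvName z == pvName m) = some m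
        ∧ ∀ z ∈ zones, PySem.Str.endswith domain (pvName z) = true →
            PySem.Str.len (pvName z) ≤ PySem.Str.len (pvName m)) := by
  induction zones using List.reverseRecOn with
  | nil => simp
  | append_singleton zs z ih =>
    rw [List.foldl_append, List.foldl_cons, List.foldl_nil]
    rcases hA : List.foldl (pvStepA domain) none zs with _ | a
    · -- best so far: none
      have hnone := ih.1 hA
      by_cases hg : PySem.Str.endswith domain (pvName z) = true
      · have hstep : pvStepA domain none z = some z := by
          simp only [pvStepA]; rw [if_pos hg]
        rw [hstep]
        refine ⟨(fun h => by cases h), ?_⟩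
        rintro m hm; injection hm with hm; subst hm
        refine ⟨hg, ?_, ?_⟩
        · rw [List.find?_append, List.find?_eq_none.mpr, Option.none_or,
            List.find?_cons_of_pos (by simp)]
          intro x hx hpx
          simp only [beq_iff_eq] at hpx
          have := hnone x hx
          rw [hpx] at this
          rw [this] at hg; cases hg
        · intro x hx hgx
          rcases List.mem_append.mp hx with hx | hx
          · rw [hnone x hx] at hgx; cases hgx
          · simp only [List.mem_singleton] at hx; subst hx; omega
      · have hstep : pvStepA domain none z = none := by
          simp only [pvStepA]; rw [if_neg hg]
        rw [hstep]
        refine ⟨?_, by rintro m hm; cases hm⟩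
        intro _ x hx
        rcases List.mem_append.mp hx with hx | hx
        · exact hnone x hx
        · simp only [List.mem_singleton] at hx; subst hx
          exact Bool.eq_false_iff.mpr hg
    · -- best so far: some a
      obtain ⟨hga, hfa, hba⟩ := ih.2 a hA
      by_cases hrep : PySem.Str.endswith domain (pvName z) = true
        ∧ PySem.Str.len (pvName z) > PySem.Str.len (pvName a)
      · obtain ⟨hg, hlen⟩ := hrep
        have hstep : pvStepA domain (some a) z = some z := by
          simp only [pvStepA]; rw [if_pos hg]
          show (if PySem.Str.len (pvName z) > PySem.Str.len (pvName a) then some z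
            else (some a : Option (List (String × String)))) = some z
          exact if_pos hlen
        rw [hstep]
        refine ⟨(fun h => by cases h), ?_⟩
        rintro m hm; injection hm with hm; subst hm
        refine ⟨hg, ?_, ?_⟩
        · rw [List.find?_append, List.find?_eq_none.mpr, Option.none_or,
            List.find?_cons_of_pos (by simp)]
          intro x hx hpx
          simp only [beq_iff_eq] at hpx
          have hgx : PySem.Str.endswith domain (pvName x) = true := by rw [hpx]; exact hg
          have h1 := hba x hx hgx
          rw [hpx] at h1
          omega
        · intro x hx hgx
          rcases List.mem_append.mp hx with hx | hx
          · exact le_trans (hba x hx hgx) (le_of_lt hlen)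
          · simp only [List.mem_singleton] at hx; subst hx; omega
      · have hstep : pvStepA domain (some a) z = some a := by
          simp only [pvStepA]
          by_cases hg : PySem.Str.endswith domain (pvName z) = true
          · have hlen : ¬ PySem.Str.len (pvName z) > PySem.Str.len (pvName a) := by
              intro h; exact hrep ⟨hg, h⟩
            rw [if_pos hg]
            show (if PySem.Str.len (pvName z) > PySem.Str.len (pvName a) then some z
              else (some a : Option (List (String × String)))) = some a
            exact if_neg hlen
          · rw [if_neg hg]
        rw [hstep]
        refine ⟨(fun h => by cases h), ?_⟩
        rintro m hm; injection hm with hm; subst hm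
        refine ⟨hga, ?_, ?_⟩
        · rw [List.find?_append, hfa, Option.some_or]
        · intro x hx hgx
          rcases List.mem_append.mp hx with hx | hx
          · exact hba x hx hgx
          · simp only [List.mem_singleton] at hx; subst hx
            by_contra hlt
            exact hrep ⟨hgx, by omega⟩

theorem pv_B_none (domain : String) (zones : List (List (String × String)))
    (h : ∀ z ∈ zones, PySem.Str.endswith domain (pvName z) = false) :
    find_zone_for_domain_alt domain zones = none := by
  simp only [find_zone_for_domain_alt]
  apply List.findSome?_eq_none_iff.mpr
  intro i hi
  have h0 : 0 ≤ i := ((PySem.List.mem_pyRange_one).mp hi).1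
  rw [pv_index_get, PySem.Dict.get?_empty, Option.none_or]
  apply List.find?_eq_none.mpr
  intro z hz hp
  simp only [beq_iff_eq] at hp
  have := pv_good_sfx domain i h0
  rw [← hp] at this
  rw [h z hz] at this
  cases this

theorem pv_B_some (domain : String) (zones : List (List (String × String)))
    (m : List (String × String))
    (h1 : PySem.Str.endswith domain (pvName m) = true)
    (h2 : zones.find? (fun z => pvName z == pvName m) = some m)
    (h3 : ∀ z ∈ zones, PySem.Str.endswith domain (pvName z) = true →
        PySem.Str.len (pvName z) ≤ PySem.Str.len (pvName m)) :
    find_zone_for_domain_alt domain zones = some m := by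
  simp only [find_zone_for_domain_alt]
  have hsuf : (pvName m).toList <:+ domain.toList := by
    rw [PySem.Str.endswith_eq] at h1
    exact (PySem.Chars.endswith_iff _ _).mp h1
  have hle : (pvName m).toList.length ≤ domain.toList.length := hsuf.length_le
  have hsplit : PySem.List.pyRange 0 (PySem.Str.len domain + 1)
      = PySem.List.pyRange 0 ((domain.toList.length : Int) - ((pvName m).toList.length : Int))
        ++ (((domain.toList.length : Int) - ((pvName m).toList.length : Int))
            :: PySem.List.pyRange ((domain.toList.length : Int) - ((pvName m).toList.length : Int) + 1)
                 ((domain.toList.length : Int) + 1)) := by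
    have hA : (0:Int) ≤ (domain.toList.length : Int) - ((pvName m).toList.length : Int) := by
      omega
    have hB : (domain.toList.length : Int) - ((pvName m).toList.length : Int)
        ≤ (domain.toList.length : Int) + 1 := by omega
    have hcons : PySem.List.pyRange
        ((domain.toList.length : Int) - ((pvName m).toList.length : Int))
        ((domain.toList.length : Int) + 1)
        = ((domain.toList.length : Int) - ((pvName m).toList.length : Int))
          :: PySem.List.pyRange
              ((domain.toList.length : Int) - ((pvName m).toList.length : Int) + 1)
              ((domain.toList.length : Int) + 1) :=
      PySem.List.pyRange_one_cons (by omega)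
    rw [PySem.Str.len_eq]
    rw [PySem.List.pyRange_one_append 0
      ((domain.toList.length : Int) - ((pvName m).toList.length : Int))
      ((domain.toList.length : Int) + 1) hA hB]
    rw [hcons]
  rw [hsplit, List.findSome?_append]
  have hfirst : (PySem.List.pyRange 0
      ((domain.toList.length : Int) - ((pvName m).toList.length : Int))).findSome?
      (fun i => (zones.foldl pvStepB PySem.Dict.empty).get? (PySem.Str.slice domain (some i) none))
      = none := by
    apply List.findSome?_eq_none_iff.mpr
    intro i hi
    obtain ⟨h0, hlt⟩ := (PySem.List.mem_pyRange_one).mp hi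
    rw [pv_index_get, PySem.Dict.get?_empty, Option.none_or]
    apply List.find?_eq_none.mpr
    intro z hz hp
    simp only [beq_iff_eq] at hp
    have hgood : PySem.Str.endswith domain (pvName z) = true := by
      rw [hp]; exact pv_good_sfx domain i h0
    have hlen := h3 z hz hgood
    rw [PySem.Str.len_eq, PySem.Str.len_eq, hp, pv_sfx_toList _ _ h0] at hlen
    rw [List.length_drop] at hlen
    omega
  rw [hfirst, Option.none_or, List.findSome?_cons]
  rw [pv_index_get, PySem.Dict.get?_empty, Option.none_or]
  rw [pv_sfx_of_suffix domain (pvName m) hsuf, h2]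


-- ===== VERDICT (by name: the statement is the Claim_ definition above) =====
theorem find_zone_for_domain_spec : Claim_equal_find_zone_for_domain := by
  intro domain zones _ _
  unfold Spec_find_zone_for_domain
  rcases h : find_zone_for_domain domain zones with _ | m
  · exact (pv_B_none domain zones ((pv_A_char domain zones).1 h)).symm
  · obtain ⟨h1, h2, h3⟩ := (pv_A_char domain zones).2 m h
    exact (pv_B_some domain zones m h1 h2 h3).symm
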